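-- pv_equiv track=rewrite | github.com/jonbobo/Capstone-UNY | ai-backend/hunter_ai.py | extract_page_info
-- ===== SOURCE A (Python) =====
-- def extract_page_info(page_text):
--     """Extract basic info from page"""
--     lines = page_text.split('\n')
--     url = ""
--     title = ""
--
--     for line in lines[:3]:
--         if "hunter.cuny.edu/" in line:
--             url = line.strip()
--             break
--
--     for line in lines:
--         clean_line = line.strip()
--         if clean_line and len(clean_line) > 10:
--             title = clean_line[:100]
--             break
--
--     return {'url': url, 'title': title}
-- ===== SOURCE B (Python) =====
-- def extract_page_info(page_text):
--     """Extract basic info from page (single-pass rewrite)."""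
--     url = ""
--     title = ""
--     url_done = False
--     title_done = False
--     for i, line in enumerate(page_text.split('\n')):
--         if not url_done:
--             if i >= 3:
--                 url_done = True
--             elif "hunter.cuny.edu/" in line:
--                 url = line.strip()
--                 url_done = True
--         if not title_done:
--             clean = line.strip()
--             if len(clean) > 10:
--                 title = clean[:100]
--                 title_done = True
--         if url_done and title_done:
--             break
--     return {'url': url, 'title': title}
-- ===== Notes on version B (the rewrite author's own statement) =====
-- stated objective: alternative
-- what changed: Replaced A's two separate scans (one over lines[:3] for the url, one over all lines for the title) with a single enumerate loop carrying url_done/title_done flags that breaks as soon as both are found.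
import Mathlib
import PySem

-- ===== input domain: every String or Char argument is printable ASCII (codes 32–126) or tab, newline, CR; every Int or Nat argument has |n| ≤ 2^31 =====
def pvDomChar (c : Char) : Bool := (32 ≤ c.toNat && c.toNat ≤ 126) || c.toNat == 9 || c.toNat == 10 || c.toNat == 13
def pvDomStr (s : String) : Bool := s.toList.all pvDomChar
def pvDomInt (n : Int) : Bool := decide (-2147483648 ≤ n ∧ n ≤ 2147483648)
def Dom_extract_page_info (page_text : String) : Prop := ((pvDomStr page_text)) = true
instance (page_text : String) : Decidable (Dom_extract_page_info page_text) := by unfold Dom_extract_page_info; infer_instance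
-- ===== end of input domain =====

-- B is a single enumerate loop with done-flags and an early break instead of A's two separate scans; same cost, different decomposition.

-- ===== PORT A =====
-- first loop: for line in lines[:3]: if "hunter.cuny.edu/" in line: url = line.strip(); break
def pvFindUrlA : List String → String
  | [] => ""
  | l :: rest =>
      if PySem.Str.isIn "hunter.cuny.edu/" l then PySem.Str.strip l else pvFindUrlA rest

-- second loop: for line in lines: clean = line.strip(); if clean and len(clean) > 10: title = clean[:100]; break
def pvFindTitleA : List String → String
  | [] => ""
  | l :: rest =>
      let c := PySem.Str.strip l
      if PySem.Str.len c ≠ 0 ∧ PySem.Str.len c > 10 then PySem.Str.slice c none (some 100)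
      else pvFindTitleA rest

def extract_page_info (page_text : String) : List (String × String) :=
  let lines := (PySem.Str.split? page_text "\n").getD []
  [("url", pvFindUrlA (PySem.List.slice lines none (some 3))), ("title", pvFindTitleA lines)]

-- ===== PORT B =====
-- the single loop of Source B: state (i, url, title, url_done, title_done), break when both flags set
def pvLoopB : Nat → String → String → Bool → Bool → List String → String × String
  | _, url, title, _, _, [] => (url, title)
  | i, url, title, url_done, title_done, l :: rest =>
      let s1 : String × Bool :=
        if url_done then (url, url_done)
        else if i ≥ 3 then (url, true)
        else if PySem.Str.isIn "hunter.cuny.edu/" l then (PySem.Str.strip l, true)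
        else (url, url_done)
      let s2 : String × Bool :=
        if title_done then (title, title_done)
        else
          let c := PySem.Str.strip l
          if PySem.Str.len c > 10 then (PySem.Str.slice c none (some 100), true)
          else (title, title_done)
      if s1.2 && s2.2 then (s1.1, s2.1)
      else pvLoopB (i + 1) s1.1 s2.1 s1.2 s2.2 rest

def extract_page_info_alt (page_text : String) : List (String × String) :=
  let lines := (PySem.Str.split? page_text "\n").getD []
  let r := pvLoopB 0 "" "" false false lines
  [("url", r.1), ("title", r.2)]

-- ===== PRECONDITION & SPEC =====
def Spec_extract_page_info (page_text : String) (out : List (String × String)) : Prop := out = extract_page_info_alt page_text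
instance (page_text : String) (out : List (String × String)) : Decidable (Spec_extract_page_info page_text out) := by unfold Spec_extract_page_info; infer_instance

-- ===== CLAIM (what is proved, stated in full; the proofs are below) =====
def Claim_equal_extract_page_info : Prop := ∀ (page_text : String), Dom_extract_page_info page_text → Spec_extract_page_info page_text (extract_page_info page_text)

-- ===== LEMMAS AND PROOFS =====

-- what B's loop leaves in the url slot if url_done is still false
def pvAuxU : Nat → String → List String → String
  | _, url, [] => url
  | i, url, l :: rest =>
      if i ≥ 3 then url
      else if PySem.Str.isIn "hunter.cuny.edu/" l then PySem.Str.strip l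
      else pvAuxU (i + 1) url rest

-- what B's loop leaves in the title slot if title_done is still false
def pvAuxT : String → List String → String
  | title, [] => title
  | title, l :: rest =>
      let c := PySem.Str.strip l
      if PySem.Str.len c > 10 then PySem.Str.slice c none (some 100)
      else pvAuxT title rest

theorem pvLoopB_eq (ls : List String) : ∀ (i : Nat) (url title : String) (ud td : Bool),
    pvLoopB i url title ud td ls =
      ((if ud then url else pvAuxU i url ls), (if td then title else pvAuxT title ls)) := by
  induction ls with
  | nil => intro i url title ud td; cases ud <;> cases td <;> simp [pvLoopB, pvAuxU, pvAuxT]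
  | cons l rest ih =>
      intro i url title ud td
      cases ud <;> cases td <;>
        simp only [pvLoopB, pvAuxU, pvAuxT, Bool.true_and,
          Bool.and_true, if_true] <;>
        split_ifs <;>
        simp_all [ih]

theorem pvAuxU_eq (ls : List String) : ∀ i : Nat, pvAuxU i "" ls = pvFindUrlA (ls.take (3 - i)) := by
  induction ls with
  | nil => intro i; simp [pvAuxU, pvFindUrlA]
  | cons l rest ih =>
      intro i
      by_cases h : i ≥ 3
      · have : 3 - i = 0 := by omega
        simp [pvAuxU, h, this, pvFindUrlA]
      · have h3 : 3 - i = (3 - (i + 1)) + 1 := by omega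
        rw [pvAuxU, h3]
        simp [h, pvFindUrlA, ih]

theorem pvAuxT_eq (ls : List String) : pvAuxT "" ls = pvFindTitleA ls := by
  induction ls with
  | nil => simp [pvAuxT, pvFindTitleA]
  | cons l rest ih =>
      have cond : (PySem.Str.len (PySem.Str.strip l) ≠ 0 ∧ PySem.Str.len (PySem.Str.strip l) > 10)
          ↔ (PySem.Str.len (PySem.Str.strip l) > 10) :=
        ⟨And.right, fun h => ⟨by omega, h⟩⟩
      rw [pvAuxT, pvFindTitleA]
      simp only [cond, ih]

-- ===== VERDICT (by name: the statement is the Claim_ definition above) =====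
theorem extract_page_info_spec : Claim_equal_extract_page_info := by
  intro page_text _
  unfold Spec_extract_page_info
  simp only [extract_page_info, extract_page_info_alt]
  generalize (PySem.Str.split? page_text "\n").getD [] = ls
  rw [pvLoopB_eq, pvAuxT_eq, pvAuxU_eq]
  rw [PySem.List.slice_to _ (by norm_num)]
  norm_num
  rfl
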